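-- pv_equiv track=rewrite | github.com/Hyeri-hci/ODOCAIagent | backend/agents/diagnosis/tools/onboarding_tasks.py | generate_reason_tags
-- ===== SOURCE A (Python) =====
-- from typing import Any, Dict, List, Literal, Optional
--
-- Difficulty = Literal["beginner", "intermediate", "advanced"]
--
-- def generate_reason_tags(labels: List[str], difficulty: Difficulty) -> List[str]:
--     """라벨에서 추천 이유 태그 생성 (LLM 프롬프트용)."""
--     tags: List[str] = []
--     labels_lower = {label.lower() for label in labels}
--
--     if labels_lower & {"good first issue", "good-first-issue"}:
--         tags.append("good_first_issue")
--
--     if labels_lower & {"help wanted", "help-wanted"}: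
--         tags.append("help_wanted")
--
--     if labels_lower & {"documentation", "docs"}:
--         tags.append("docs_issue")
--
--     if labels_lower & {"tests", "testing"}:
--         tags.append("test_issue")
--
--     if labels_lower & {"hacktoberfest"}:
--         tags.append("hacktoberfest")
--
--     if labels_lower & {"bug"}:
--         tags.append("bug_fix")
--
--     if labels_lower & {"security"}:
--         tags.append("security_issue")
--
--     if labels_lower & {"enhancement", "feature"}:
--         tags.append("feature_request")
--
--     if labels_lower & {"refactor", "refactoring"}:
--         tags.append("refactoring")
--
--     # 기본 난이도 태그 (다른 태그가 없을 때)
--     if not tags: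
--         tags.append(f"difficulty_{difficulty}")
--
--     return tags
-- ===== SOURCE B (Python) =====
-- _LABEL_TO_TAG = {
--     "good first issue": "good_first_issue",
--     "good-first-issue": "good_first_issue",
--     "help wanted": "help_wanted",
--     "help-wanted": "help_wanted",
--     "documentation": "docs_issue",
--     "docs": "docs_issue",
--     "tests": "test_issue",
--     "testing": "test_issue",
--     "hacktoberfest": "hacktoberfest",
--     "bug": "bug_fix",
--     "security": "security_issue",
--     "enhancement": "feature_request",
--     "feature": "feature_request",
--     "refactor": "refactoring",
--     "refactoring": "refactoring",
-- }
--
-- _TAG_ORDER = [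
--     "good_first_issue", "help_wanted", "docs_issue", "test_issue",
--     "hacktoberfest", "bug_fix", "security_issue", "feature_request", "refactoring",
-- ]
--
--
-- def generate_reason_tags(labels, difficulty):
--     """Single pass over labels through a label->tag index, then emit hit tags in fixed order."""
--     hit = {_LABEL_TO_TAG[l] for l in (lab.lower() for lab in labels) if l in _LABEL_TO_TAG}
--     tags = [t for t in _TAG_ORDER if t in hit]
--     return tags if tags else ["difficulty_" + difficulty]
-- ===== Notes on version B (the rewrite author's own statement) =====
-- stated objective: alternative
-- what changed: A lowers the labels into a set and runs nine separate set-intersection tests, one per hard-coded rule branch; B makes one pass over the labels through a label-to-tag index dict and then emits the hit tags by filtering a fixed tag-order table, so the per-rule membership scans disappear.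
import Mathlib
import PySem

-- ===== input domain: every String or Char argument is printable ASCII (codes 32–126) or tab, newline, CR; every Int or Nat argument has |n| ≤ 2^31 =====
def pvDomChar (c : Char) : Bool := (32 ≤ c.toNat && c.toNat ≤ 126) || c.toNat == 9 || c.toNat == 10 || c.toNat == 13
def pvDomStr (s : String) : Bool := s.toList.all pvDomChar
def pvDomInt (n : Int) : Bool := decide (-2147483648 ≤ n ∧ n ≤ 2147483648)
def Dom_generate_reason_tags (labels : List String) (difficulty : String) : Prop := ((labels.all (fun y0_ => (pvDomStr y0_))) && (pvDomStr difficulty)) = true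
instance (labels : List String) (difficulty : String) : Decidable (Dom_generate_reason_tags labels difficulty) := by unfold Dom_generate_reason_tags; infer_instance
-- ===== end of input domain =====

-- B replaces A's nine per-rule set-intersection tests by one pass over the labels through a
-- label→tag index, then emits the hit tags in a fixed order (objective: alternative).

-- ===== PORT A =====
def generate_reason_tags (labels : List String) (difficulty : String) : List String :=
  let labels_lower : PySem.Set String := PySem.Set.ofList (labels.map PySem.Str.lower)
  let tags : List String := []
  let tags := if PySem.Set.inter labels_lower (PySem.Set.ofList ["good first issue", "good-first-issue"]) ≠ [] then tags ++ ["good_first_issue"] else tags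
  let tags := if PySem.Set.inter labels_lower (PySem.Set.ofList ["help wanted", "help-wanted"]) ≠ [] then tags ++ ["help_wanted"] else tags
  let tags := if PySem.Set.inter labels_lower (PySem.Set.ofList ["documentation", "docs"]) ≠ [] then tags ++ ["docs_issue"] else tags
  let tags := if PySem.Set.inter labels_lower (PySem.Set.ofList ["tests", "testing"]) ≠ [] then tags ++ ["test_issue"] else tags
  let tags := if PySem.Set.inter labels_lower (PySem.Set.ofList ["hacktoberfest"]) ≠ [] then tags ++ ["hacktoberfest"] else tags
  let tags := if PySem.Set.inter labels_lower (PySem.Set.ofList ["bug"]) ≠ [] then tags ++ ["bug_fix"] else tags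
  let tags := if PySem.Set.inter labels_lower (PySem.Set.ofList ["security"]) ≠ [] then tags ++ ["security_issue"] else tags
  let tags := if PySem.Set.inter labels_lower (PySem.Set.ofList ["enhancement", "feature"]) ≠ [] then tags ++ ["feature_request"] else tags
  let tags := if PySem.Set.inter labels_lower (PySem.Set.ofList ["refactor", "refactoring"]) ≠ [] then tags ++ ["refactoring"] else tags
  let tags := if tags = [] then tags ++ ["difficulty_" ++ difficulty] else tags
  tags

-- ===== PORT B =====
def pvLabelToTag : PySem.Dict String String := PySem.Dict.ofList
  [("good first issue", "good_first_issue"), ("good-first-issue", "good_first_issue"),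
   ("help wanted", "help_wanted"), ("help-wanted", "help_wanted"),
   ("documentation", "docs_issue"), ("docs", "docs_issue"),
   ("tests", "test_issue"), ("testing", "test_issue"),
   ("hacktoberfest", "hacktoberfest"),
   ("bug", "bug_fix"),
   ("security", "security_issue"),
   ("enhancement", "feature_request"), ("feature", "feature_request"),
   ("refactor", "refactoring"), ("refactoring", "refactoring")]

def pvTagOrder : List String :=
  ["good_first_issue", "help_wanted", "docs_issue", "test_issue",
   "hacktoberfest", "bug_fix", "security_issue", "feature_request", "refactoring"]

def generate_reason_tags_alt (labels : List String) (difficulty : String) : List String :=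
  let hit : PySem.Set String := labels.foldl (fun s lab =>
    match PySem.Dict.get? pvLabelToTag (PySem.Str.lower lab) with
    | some t => PySem.Set.add s t
    | none => s) PySem.Set.empty
  let tags := pvTagOrder.filter (fun t => PySem.Set.contains hit t)
  if tags = [] then ["difficulty_" ++ difficulty] else tags

-- ===== PRECONDITION & SPEC =====
def Spec_generate_reason_tags (labels : List String) (difficulty : String) (out : List String) : Prop := out = generate_reason_tags_alt labels difficulty
instance (labels : List String) (difficulty : String) (out : List String) : Decidable (Spec_generate_reason_tags labels difficulty out) := by unfold Spec_generate_reason_tags; infer_instance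

-- ===== CLAIM (what is proved, stated in full; the proofs are below) =====
def Claim_equal_generate_reason_tags : Prop := ∀ (labels : List String) (difficulty : String), Dom_generate_reason_tags labels difficulty → Spec_generate_reason_tags labels difficulty (generate_reason_tags labels difficulty)

-- ===== LEMMAS AND PROOFS =====

-- the trigger labels of each tag, in A's branch order (proof-side bookkeeping)
def pvTriggers (t : String) : List String :=
  if t = "good_first_issue" then ["good first issue", "good-first-issue"]
  else if t = "help_wanted" then ["help wanted", "help-wanted"]
  else if t = "docs_issue" then ["documentation", "docs"]
  else if t = "test_issue" then ["tests", "testing"]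
  else if t = "hacktoberfest" then ["hacktoberfest"]
  else if t = "bug_fix" then ["bug"]
  else if t = "security_issue" then ["security"]
  else if t = "feature_request" then ["enhancement", "feature"]
  else if t = "refactoring" then ["refactor", "refactoring"]
  else []

-- B's hit set, named for the proofs (definitionally the foldl inside generate_reason_tags_alt)
def pvHit (labels : List String) : PySem.Set String :=
  labels.foldl (fun s lab =>
    match PySem.Dict.get? pvLabelToTag (PySem.Str.lower lab) with
    | some t => PySem.Set.add s t
    | none => s) PySem.Set.empty

lemma alt_eq_pvHit (labels : List String) (difficulty : String) :
    generate_reason_tags_alt labels difficulty =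
      (let tags := pvTagOrder.filter (fun t => PySem.Set.contains (pvHit labels) t)
       if tags = [] then ["difficulty_" ++ difficulty] else tags) := rfl

-- membership in B's hit set = some label lowers into the index with that tag
lemma mem_hit_fold (labels : List String) (s : PySem.Set String) (t : String) :
    t ∈ labels.foldl (fun s lab =>
      match PySem.Dict.get? pvLabelToTag (PySem.Str.lower lab) with
      | some u => PySem.Set.add s u
      | none => s) s ↔
    t ∈ s ∨ ∃ lab ∈ labels, PySem.Dict.get? pvLabelToTag (PySem.Str.lower lab) = some t := by
  induction labels generalizing s with
  | nil => simp
  | cons hd tl ih =>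
    simp only [List.foldl_cons, ih, List.mem_cons]
    cases h : PySem.Dict.get? pvLabelToTag (PySem.Str.lower hd) with
    | none =>
      constructor
      · rintro (hs | ⟨lab, hm, he⟩)
        · exact Or.inl hs
        · exact Or.inr ⟨lab, Or.inr hm, he⟩
      · rintro (hs | ⟨lab, (rfl | hm), he⟩)
        · exact Or.inl hs
        · rw [h] at he; cases he
        · exact Or.inr ⟨lab, hm, he⟩
    | some u =>
      rw [show (match some u with | some u => PySem.Set.add s u | none => s) = PySem.Set.add s u from rfl]
      constructor
      · rintro (hs | ⟨lab, hm, he⟩)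
        · rcases (PySem.Set.mem_add s u t).mp hs with hs' | rfl
          · exact Or.inl hs'
          · exact Or.inr ⟨hd, Or.inl rfl, h⟩
        · exact Or.inr ⟨lab, Or.inr hm, he⟩
      · rintro (hs | ⟨lab, (rfl | hm), he⟩)
        · exact Or.inl ((PySem.Set.mem_add s u t).mpr (Or.inl hs))
        · rw [h] at he; injection he with he; exact Or.inl ((PySem.Set.mem_add s u t).mpr (Or.inr he.symm))
        · exact Or.inr ⟨lab, hm, he⟩

-- A's set-intersection test = some label lowers into the trigger set
lemma inter_ne_nil_iff (labels : List String) (S : List String) :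
    PySem.Set.inter (PySem.Set.ofList (labels.map PySem.Str.lower)) (PySem.Set.ofList S) ≠ [] ↔
    ∃ lab ∈ labels, PySem.Str.lower lab ∈ S := by
  rw [Ne, List.eq_nil_iff_forall_not_mem]
  push Not
  constructor
  · rintro ⟨y, hy⟩
    rw [PySem.Set.mem_inter, PySem.Set.mem_ofList, PySem.Set.mem_ofList, List.mem_map] at hy
    obtain ⟨⟨lab, hm, rfl⟩, hS⟩ := hy
    exact ⟨lab, hm, hS⟩
  · rintro ⟨lab, hm, hS⟩
    exact ⟨PySem.Str.lower lab, by
      rw [PySem.Set.mem_inter, PySem.Set.mem_ofList, PySem.Set.mem_ofList]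
      exact ⟨List.mem_map.mpr ⟨lab, hm, rfl⟩, hS⟩⟩

-- the index maps s to tag t exactly when s is one of t's trigger labels
lemma get?_labelToTag (s : String) (t : String) (ht : t ∈ pvTagOrder) :
    PySem.Dict.get? pvLabelToTag s = some t ↔ s ∈ pvTriggers t := by
  have hitems : pvLabelToTag.items =
    [("good first issue", "good_first_issue"), ("good-first-issue", "good_first_issue"),
     ("help wanted", "help_wanted"), ("help-wanted", "help_wanted"),
     ("documentation", "docs_issue"), ("docs", "docs_issue"),
     ("tests", "test_issue"), ("testing", "test_issue"),
     ("hacktoberfest", "hacktoberfest"),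
     ("bug", "bug_fix"),
     ("security", "security_issue"),
     ("enhancement", "feature_request"), ("feature", "feature_request"),
     ("refactor", "refactoring"), ("refactoring", "refactoring")] := by decide
  simp only [pvTagOrder, List.mem_cons, List.not_mem_nil, or_false] at ht
  rcases ht with rfl | rfl | rfl | rfl | rfl | rfl | rfl | rfl | rfl <;>
  · simp only [pvTriggers, String.reduceEq, reduceIte]
    simp only [PySem.Dict.get?, hitems, List.find?]
    clear hitems
    repeat' split
    all_goals simp only [beq_iff_eq, beq_eq_false_iff_ne, ne_eq, Option.map_some, Option.map_none,
      Option.some.injEq, List.mem_cons, List.not_mem_nil, or_false,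
      reduceCtorEq, false_iff] at *
    all_goals (rename_i heq; first | (subst heq; decide) | (rintro (rfl | rfl) <;> simp_all))

-- B's membership test equals A's set-intersection test, for every tag of the table
lemma contains_hit_eq (labels : List String) (t : String) (ht : t ∈ pvTagOrder) :
    PySem.Set.contains (pvHit labels) t =
      decide (PySem.Set.inter (PySem.Set.ofList (labels.map PySem.Str.lower))
        (PySem.Set.ofList (pvTriggers t)) ≠ []) := by
  rw [Bool.eq_iff_iff, PySem.Set.contains_iff, decide_eq_true_eq, inter_ne_nil_iff, pvHit,
    mem_hit_fold]
  simp only [PySem.Set.empty, List.not_mem_nil, false_or]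
  constructor
  · rintro ⟨lab, hm, he⟩
    exact ⟨lab, hm, (get?_labelToTag _ t ht).mp he⟩
  · rintro ⟨lab, hm, he⟩
    exact ⟨lab, hm, (get?_labelToTag _ t ht).mpr he⟩

-- A's chained appends are the fold of the same rule over the tag table
lemma foldl_append_filter (p : String → Prop) [DecidablePred p] (ts acc : List String) :
    ts.foldl (fun tags t => if p t then tags ++ [t] else tags) acc
      = acc ++ ts.filter (fun t => decide (p t)) := by
  induction ts generalizing acc with
  | nil => simp
  | cons hd tl ih =>
    simp only [List.foldl_cons, List.filter_cons, ih]
    split_ifs with h <;> simp_all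

lemma a_as_foldl (labels : List String) (difficulty : String) :
    generate_reason_tags labels difficulty =
      (let tags := pvTagOrder.foldl (fun tags t =>
         if PySem.Set.inter (PySem.Set.ofList (labels.map PySem.Str.lower))
              (PySem.Set.ofList (pvTriggers t)) ≠ [] then tags ++ [t] else tags) []
       if tags = [] then tags ++ ["difficulty_" ++ difficulty] else tags) := rfl

-- ===== VERDICT (by name: the statement is the Claim_ definition above) =====
theorem generate_reason_tags_spec : Claim_equal_generate_reason_tags := by
  intro labels difficulty _hdom
  unfold Spec_generate_reason_tags
  rw [a_as_foldl, alt_eq_pvHit,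
    foldl_append_filter (fun t => PySem.Set.inter (PySem.Set.ofList (labels.map PySem.Str.lower))
      (PySem.Set.ofList (pvTriggers t)) ≠ []) pvTagOrder [],
    List.filter_congr (fun t ht => (contains_hit_eq labels t ht).symm :
      ∀ t ∈ pvTagOrder, (decide (PySem.Set.inter (PySem.Set.ofList (labels.map PySem.Str.lower))
        (PySem.Set.ofList (pvTriggers t)) ≠ [])) = PySem.Set.contains (pvHit labels) t)]
  simp only [List.nil_append]
  split_ifs with h
  · simp [h]
  · rfl
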